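-- pv_equiv track=rewrite | github.com/juemura/nb_whiteboarding | Other problems/db.py | db
-- ===== SOURCE A (Python) =====
-- def db(x):
--     temp = x
--     dec = 0
--     i = 0
--     while temp:
--         digit = temp%10
--         dec += digit*(2**i)
--         i += 1
--         temp //= 10
--     return dec
-- ===== SOURCE B (Python) =====
-- def db(x):
--     if x == 0:
--         return 0
--     return db(x // 10) * 2 + x % 10
-- ===== Notes on version B (the rewrite author's own statement) =====
-- stated objective: simpler
-- what changed: Replaces the least-significant-first loop carrying an index and a 2**i positional weight with a Horner-style recursion on x//10 (dec = dec*2 + digit, most-significant digit first), so no counter and no power computation remain.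
import Mathlib
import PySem

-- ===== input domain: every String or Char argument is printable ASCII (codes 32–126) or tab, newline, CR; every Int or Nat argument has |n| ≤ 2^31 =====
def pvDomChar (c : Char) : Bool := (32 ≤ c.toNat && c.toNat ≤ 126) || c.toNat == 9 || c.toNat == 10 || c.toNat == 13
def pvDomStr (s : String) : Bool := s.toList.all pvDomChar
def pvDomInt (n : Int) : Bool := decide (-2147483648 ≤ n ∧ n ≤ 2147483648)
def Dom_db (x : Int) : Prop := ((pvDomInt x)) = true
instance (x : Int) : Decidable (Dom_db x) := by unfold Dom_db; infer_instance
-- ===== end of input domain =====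

-- B is simpler: a Horner-style recursion (dec = dec*2 + digit, most-significant first) replacing A's
-- least-significant-first loop with an index and a 2**i positional weight; equal return value for all x ≥ 0.

-- ===== PORT A =====
-- while temp: digit = temp%10; dec += digit*(2**i); i += 1; temp //= 10
-- (the 'temp < 0 → stop' branch is a totality guard only: Python A never terminates there,
--  and Pre_db excludes those inputs)
def dbAux (temp dec : Int) (i : Nat) : Int :=
  if temp = 0 then dec
  else if temp < 0 then dec
  else dbAux (PySem.Int.floordiv temp 10) (dec + (PySem.Int.mod temp 10) * 2 ^ i) (i + 1)
termination_by temp.toNat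
decreasing_by
  have h10 : (0:Int) < 10 := by norm_num
  rw [PySem.Int.floordiv_eq_ediv_of_pos h10]
  omega

def db (x : Int) : Int := dbAux x 0 0

-- ===== PORT B =====
def db_alt (x : Int) : Int :=
  if x = 0 then 0
  else if x < 0 then 0  -- totality guard: Python B does not return on x < 0; outside Pre_db
  else db_alt (PySem.Int.floordiv x 10) * 2 + PySem.Int.mod x 10
termination_by x.toNat
decreasing_by
  have h10 : (0:Int) < 10 := by norm_num
  rw [PySem.Int.floordiv_eq_ediv_of_pos h10]
  omega

-- ===== PRECONDITION & SPEC =====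
-- Pre_db excludes negative x: there Python A loops forever (temp //= 10 stalls at -1), so A returns no value.
def Pre_db (x : Int) : Prop := 0 ≤ x
instance (x : Int) : Decidable (Pre_db x) := by unfold Pre_db; infer_instance
def pvWitness_db : Int := (101)
def Spec_db (x : Int) (out : Int) : Prop := out = db_alt x
instance (x : Int) (out : Int) : Decidable (Spec_db x out) := by unfold Spec_db; infer_instance

-- ===== CLAIM (what is proved, stated in full; the proofs are below) =====
def Claim_equal_db : Prop := ∀ (x : Int), Dom_db x → Pre_db x → Spec_db x (db x)

-- ===== LEMMAS AND PROOFS =====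
theorem dbAux_eq (n : Nat) : ∀ (temp dec : Int) (i : Nat), temp.toNat = n → 0 ≤ temp →
    dbAux temp dec i = dec + db_alt temp * 2 ^ i := by
  induction n using Nat.strong_induction_on with
  | _ n ih =>
    intro temp dec i hn htemp
    rw [dbAux, db_alt]
    by_cases h0 : temp = 0
    · simp [h0]
    · have hpos : 0 < temp := lt_of_le_of_ne htemp (Ne.symm h0)
      have h10 : (0:Int) < 10 := by norm_num
      have hdiv : PySem.Int.floordiv temp 10 = temp / 10 :=
        PySem.Int.floordiv_eq_ediv_of_pos h10
      have hlt : (temp / 10).toNat < n := by rw [← hn]; omega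
      have hge : 0 ≤ temp / 10 := by positivity
      rw [if_neg h0, if_neg (by omega), if_neg h0, if_neg (by omega), hdiv,
        ih _ hlt _ _ _ rfl hge]
      ring

theorem db_spec : Claim_equal_db := by
  intro x _ hpre
  unfold Spec_db db
  simpa using dbAux_eq x.toNat x 0 0 rfl hpre
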